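-- pv_equiv track=rewrite | github.com/YouZhang/Arranger | chord_generate/Arrange_step_2.py | change_min_chord
-- ===== SOURCE A (Python) =====
-- Am_change = {'2':'D7sus2','4':'Fsus4','5':'Am7/F(A)'};
--
-- Dm_change = {'1':'Dm7','3':'Fmaj7','5':'Fsus4','7':'Dm6'};
--
-- Em_change = {'1':'C/E','2':'Em7','4':'Fmaj7'};
--
-- def change_min_chord(song_note,chord_list_1):
--     for i in range(len(song_note)):
--         matched_chord = chord_list_1[i]
--         if(matched_chord == 'Am' or matched_chord == 'Am7'):
--             for note,chord in Am_change.items():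
--                 if(note in song_note[i]):
--                     chord_list_1[i] = Am_change[note]
--
--         elif(matched_chord == 'Dm'):
--             for note,chord in Dm_change.items():
--                 if(note in song_note[i]):
--                     chord_list_1[i] = Dm_change[note]
--         elif(matched_chord == 'Em'):
--             for note,chord in Em_change.items():
--                 if(note in song_note[i]):
--                     chord_list_1[i] = Em_change[note]
--     return chord_list_1
-- ===== SOURCE B (Python) =====
-- Am_change = {'2': 'D7sus2', '4': 'Fsus4', '5': 'Am7/F(A)'}
-- Dm_change = {'1': 'Dm7', '3': 'Fmaj7', '5': 'Fsus4', '7': 'Dm6'}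
-- Em_change = {'1': 'C/E', '2': 'Em7', '4': 'Fmaj7'}
--
-- # Every replacement key is a single character, so "note in song_note[i]" is just
-- # character membership, and "last matching dict entry wins" is "the present key
-- # with the highest priority (= position in the dict) wins".  B therefore scans
-- # the notes STRING once per position, keeping the best-priority hit, instead of
-- # substring-testing every dict key.
-- def _prioritize(d):
--     return {note: (p, chord) for p, (note, chord) in enumerate(d.items())}
--
-- _TABLE = {name: _prioritize(d) for name, d in
--           (('Am', Am_change), ('Am7', Am_change), ('Dm', Dm_change), ('Em', Em_change))}
--
--
-- def change_min_chord(song_note, chord_list_1):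
--     for i in range(len(song_note)):
--         table = _TABLE.get(chord_list_1[i])
--         if table is None:
--             continue
--         best, repl = -1, None
--         for ch in song_note[i]:          # one scan of the notes string
--             hit = table.get(ch)
--             if hit is not None and hit[0] > best:
--                 best, repl = hit
--         if repl is not None:
--             chord_list_1[i] = repl
--     return chord_list_1
-- ===== Notes on version B (the rewrite author's own statement) =====
-- stated objective: alternative
-- what changed: Instead of substring-testing each key of the matching replacement dict and letting the last match overwrite (A), B inverts the data: each replacement dict is turned into a char->(priority,chord) map and each notes string is scanned once, keeping the highest-priority character found (all keys are single characters, so last-match-in-dict-order equals highest priority present). A raises IndexError when chord_list_1 is shorter than song_note; Pre_ excludes exactly those inputs.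
import Mathlib
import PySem

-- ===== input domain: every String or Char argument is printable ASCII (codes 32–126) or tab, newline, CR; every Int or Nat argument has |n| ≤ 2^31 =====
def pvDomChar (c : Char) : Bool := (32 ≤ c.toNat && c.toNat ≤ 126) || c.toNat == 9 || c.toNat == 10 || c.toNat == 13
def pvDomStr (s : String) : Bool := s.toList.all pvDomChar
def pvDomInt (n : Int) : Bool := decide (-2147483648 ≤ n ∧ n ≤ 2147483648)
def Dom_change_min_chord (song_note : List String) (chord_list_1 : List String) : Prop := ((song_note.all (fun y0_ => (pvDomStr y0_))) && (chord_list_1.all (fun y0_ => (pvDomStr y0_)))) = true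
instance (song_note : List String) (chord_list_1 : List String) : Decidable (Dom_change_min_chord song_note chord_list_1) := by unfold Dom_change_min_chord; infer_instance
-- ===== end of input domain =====

-- B inverts the data: each replacement dict becomes a char->(priority,chord) map and each
-- notes string is scanned once keeping the highest-priority hit (all keys are single chars,
-- so this equals A's last-match-in-dict-order); A mutates chord_list_1 in place, this
-- equivalence is about the return value only.


-- ===== PORT A =====
-- module constants (dict literals with distinct keys; .items() order = insertion order)
def Am_change : List (String × String) := [("2", "D7sus2"), ("4", "Fsus4"), ("5", "Am7/F(A)")]
def Dm_change : List (String × String) := [("1", "Dm7"), ("3", "Fmaj7"), ("5", "Fsus4"), ("7", "Dm6")]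
def Em_change : List (String × String) := [("1", "C/E"), ("2", "Em7"), ("4", "Fmaj7")]

-- A's 'chord_list_1[i] = X_change[note]' looks up the literal dict at the iterated key, which
-- (distinct keys) is exactly the iterated value p.2.
def change_min_chord (song_note : List String) (chord_list_1 : List String) : List String :=
  (PySem.List.pyRange 0 (PySem.List.len song_note) 1).foldl
    (fun lst i =>
      let matched_chord := PySem.List.pyGetD lst i ""
      if matched_chord == "Am" || matched_chord == "Am7" then
        Am_change.foldl (fun l p =>
          if PySem.Str.isIn p.1 (PySem.List.pyGetD song_note i "") then PySem.List.pySetD l i p.2 else l) lst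
      else if matched_chord == "Dm" then
        Dm_change.foldl (fun l p =>
          if PySem.Str.isIn p.1 (PySem.List.pyGetD song_note i "") then PySem.List.pySetD l i p.2 else l) lst
      else if matched_chord == "Em" then
        Em_change.foldl (fun l p =>
          if PySem.Str.isIn p.1 (PySem.List.pyGetD song_note i "") then PySem.List.pySetD l i p.2 else l) lst
      else lst)
    chord_list_1

-- ===== PORT B =====
-- _prioritize(d): char key -> (priority = position in the dict, replacement chord)
def amPrio : PySem.Dict String (Int × String) :=
  PySem.Dict.ofList [("2", (0, "D7sus2")), ("4", (1, "Fsus4")), ("5", (2, "Am7/F(A)"))]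
def dmPrio : PySem.Dict String (Int × String) :=
  PySem.Dict.ofList [("1", (0, "Dm7")), ("3", (1, "Fmaj7")), ("5", (2, "Fsus4")), ("7", (3, "Dm6"))]
def emPrio : PySem.Dict String (Int × String) :=
  PySem.Dict.ofList [("1", (0, "C/E")), ("2", (1, "Em7")), ("4", (2, "Fmaj7"))]

def tableB : PySem.Dict String (PySem.Dict String (Int × String)) :=
  PySem.Dict.ofList [("Am", amPrio), ("Am7", amPrio), ("Dm", dmPrio), ("Em", emPrio)]

-- 'for ch in s' yields 1-char strings, ported as the char list with a singleton-string lookup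
def change_min_chord_alt (song_note : List String) (chord_list_1 : List String) : List String :=
  (PySem.List.pyRange 0 (PySem.List.len song_note) 1).foldl
    (fun lst i =>
      match PySem.Dict.get? tableB (PySem.List.pyGetD lst i "") with
      | none => lst
      | some table =>
          let st := (PySem.List.pyGetD song_note i "").toList.foldl
            (fun (s : Int × Option String) ch =>
              match PySem.Dict.get? table (String.ofList [ch]) with
              | some hit => if hit.1 > s.1 then (hit.1, some hit.2) else s
              | none => s) ((-1 : Int), (none : Option String))
          match st.2 with
          | none => lst
          | some r => PySem.List.pySetD lst i r)
    chord_list_1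

-- ===== PRECONDITION & SPEC =====
-- Pre_ excludes exactly the inputs where A raises IndexError (chord_list_1 shorter than song_note).
def Pre_change_min_chord (song_note : List String) (chord_list_1 : List String) : Prop :=
  song_note.length ≤ chord_list_1.length
instance (song_note : List String) (chord_list_1 : List String) : Decidable (Pre_change_min_chord song_note chord_list_1) := by unfold Pre_change_min_chord; infer_instance

def pvWitness_change_min_chord : List String × List String := (["1 3", "5"], ["Am", "Dm"])

def Spec_change_min_chord (song_note : List String) (chord_list_1 : List String) (out : List String) : Prop := out = change_min_chord_alt song_note chord_list_1
instance (song_note : List String) (chord_list_1 : List String) (out : List String) : Decidable (Spec_change_min_chord song_note chord_list_1 out) := by unfold Spec_change_min_chord; infer_instance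

-- ===== CLAIM (what is proved, stated in full; the proofs are below) =====
def Claim_equal_change_min_chord : Prop := ∀ (song_note : List String) (chord_list_1 : List String), Dom_change_min_chord song_note chord_list_1 → Pre_change_min_chord song_note chord_list_1 → Spec_change_min_chord song_note chord_list_1 (change_min_chord song_note chord_list_1)

-- ===== LEMMAS AND PROOFS =====

-- canonical per-position value both programs compute (proof-only helper)
def canonSubst (notes chord : String) : String :=
  if chord = "Am" ∨ chord = "Am7" then
    (((Am_change.filter (fun p => PySem.Str.isIn p.1 notes)).map Prod.snd).getLast?).getD chord
  else if chord = "Dm" then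
    (((Dm_change.filter (fun p => PySem.Str.isIn p.1 notes)).map Prod.snd).getLast?).getD chord
  else if chord = "Em" then
    (((Em_change.filter (fun p => PySem.Str.isIn p.1 notes)).map Prod.snd).getLast?).getD chord
  else chord

-- the two loop bodies, named so the outer-loop lemma can be instantiated (proof-only)
def FA (song_note : List String) : List String → Int → List String := fun lst i =>
  let matched_chord := PySem.List.pyGetD lst i ""
  if matched_chord == "Am" || matched_chord == "Am7" then
    Am_change.foldl (fun l p =>
      if PySem.Str.isIn p.1 (PySem.List.pyGetD song_note i "") then PySem.List.pySetD l i p.2 else l) lst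
  else if matched_chord == "Dm" then
    Dm_change.foldl (fun l p =>
      if PySem.Str.isIn p.1 (PySem.List.pyGetD song_note i "") then PySem.List.pySetD l i p.2 else l) lst
  else if matched_chord == "Em" then
    Em_change.foldl (fun l p =>
      if PySem.Str.isIn p.1 (PySem.List.pyGetD song_note i "") then PySem.List.pySetD l i p.2 else l) lst
  else lst

def FB (song_note : List String) : List String → Int → List String := fun lst i =>
  match PySem.Dict.get? tableB (PySem.List.pyGetD lst i "") with
  | none => lst
  | some table =>
      let st := (PySem.List.pyGetD song_note i "").toList.foldl
        (fun (s : Int × Option String) ch =>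
          match PySem.Dict.get? table (String.ofList [ch]) with
          | some hit => if hit.1 > s.1 then (hit.1, some hit.2) else s
          | none => s) ((-1 : Int), (none : Option String))
      match st.2 with
      | none => lst
      | some r => PySem.List.pySetD lst i r

-- A's inner overwrite loop over one replacement dict writes the LAST matching value into slot i
theorem inner_foldl_eq (items : List (String × String)) (q : String × String → Bool) (i : Nat) (l : List String) :
    items.foldl (fun l p => if q p then l.set i p.2 else l) l
      = (match ((items.filter q).map Prod.snd).getLast? with
         | none => l
         | some v => l.set i v) := by
  induction items generalizing l with
  | nil => rfl
  | cons p rest ih =>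
    by_cases hc : q p
    · rw [List.foldl_cons, if_pos hc, List.filter_cons_of_pos hc, List.map_cons, ih]
      cases hL : ((rest.filter q).map Prod.snd).getLast? with
      | none =>
        have hnil : (rest.filter q).map Prod.snd = [] := List.getLast?_eq_none_iff.mp hL
        rw [hnil]
        rfl
      | some v =>
        obtain ⟨x, xs, hxx⟩ : ∃ x xs, (rest.filter q).map Prod.snd = x :: xs := by
          cases h : (rest.filter q).map Prod.snd with
          | nil => rw [h] at hL; simp at hL
          | cons x xs => exact ⟨x, xs, rfl⟩
        rw [hxx] at hL ⊢
        rw [List.getLast?_cons_cons, hL]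
        exact List.set_set ..
    · rw [List.foldl_cons, if_neg hc, List.filter_cons_of_neg hc]
      exact ih l

-- string equality of singleton strings is char equality
theorem beq_singleton (d c : Char) :
    ((String.ofList [d]) == (String.ofList [c])) = decide (d = c) := by
  by_cases h : d = c
  · subst h; simp
  · simp [h, String.ext_iff]

-- membership of a single-char key string is char membership in the notes string
theorem isIn_singleton (c : Char) (s : String) :
    PySem.Str.isIn (String.ofList [c]) s = s.toList.contains c := by
  rw [PySem.Str.isIn_eq]
  by_cases h : c ∈ s.toList
  · have h1 := (PySem.Chars.isIn_iff_infix [c] s.toList).mpr ((List.singleton_infix_iff c s.toList).mpr h)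
    simp only [show (String.ofList [c]).toList = [c] from by simp]
    simp [h1, h]
  · have h1 : ¬ PySem.Chars.isIn [c] s.toList = true := fun hx =>
      h ((List.singleton_infix_iff c s.toList).mp ((PySem.Chars.isIn_iff_infix [c] s.toList).mp hx))
    simp only [Bool.not_eq_true] at h1
    simp only [show (String.ofList [c]).toList = [c] from by simp]
    simp [h1, h]

-- one step of A's index loop is a set at i of the canonical per-position value
theorem stepA_eq_set (song_note : List String) (lst : List String) (j : Nat)
    (hj : j < lst.length) (hjs : j < song_note.length) :
    FA song_note lst (j : Int)
      = lst.set j (canonSubst (song_note.getD j "") (lst.getD j "")) := by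
  unfold FA
  simp only [PySem.List.pyGetD_natCast, PySem.List.pySetD_natCast]
  have hset : lst.set j (lst.getD j "") = lst := by
    rw [List.getD_eq_getElem lst "" hj]; exact List.set_getElem_self ..
  set notes := song_note.getD j "" with hn
  set chord := lst.getD j "" with hc
  by_cases hAm : chord = "Am" ∨ chord = "Am7"
  · rw [if_pos (by rcases hAm with h | h <;> rw [h] <;> decide), inner_foldl_eq]
    rw [canonSubst, if_pos hAm]
    cases ((Am_change.filter (fun p => PySem.Str.isIn p.1 notes)).map Prod.snd).getLast? with
    | none => exact hset.symm
    | some v => rfl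
  · rw [if_neg (by simpa using hAm)]
    by_cases hDm : chord = "Dm"
    · rw [if_pos (by rw [hDm]; decide), inner_foldl_eq]
      rw [canonSubst, if_neg hAm, if_pos hDm]
      cases ((Dm_change.filter (fun p => PySem.Str.isIn p.1 notes)).map Prod.snd).getLast? with
      | none => exact hset.symm
      | some v => rfl
    · rw [if_neg (by simpa using hDm)]
      by_cases hEm : chord = "Em"
      · rw [if_pos (by rw [hEm]; decide), inner_foldl_eq]
        rw [canonSubst, if_neg hAm, if_neg hDm, if_pos hEm]
        cases ((Em_change.filter (fun p => PySem.Str.isIn p.1 notes)).map Prod.snd).getLast? with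
        | none => exact hset.symm
        | some v => rfl
      · rw [if_neg (by simpa using hEm)]
        rw [canonSubst, if_neg hAm, if_neg hDm, if_neg hEm]
        exact hset.symm

-- B's inner char-scan step function for a fixed priority table
def stepB (t : PySem.Dict String (Int × String)) (s : Int × Option String) (ch : Char) : Int × Option String :=
  match PySem.Dict.get? t (String.ofList [ch]) with
  | some hit => if hit.1 > s.1 then (hit.1, some hit.2) else s
  | none => s

-- canonical states of each scan, indexed by which key chars have been seen
def stAm (b2 b4 b5 : Bool) : Int × Option String :=
  if b5 then (2, some "Am7/F(A)") else if b4 then (1, some "Fsus4")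
  else if b2 then (0, some "D7sus2") else (-1, none)

def stDm (b1 b3 b5 b7 : Bool) : Int × Option String :=
  if b7 then (3, some "Dm6") else if b5 then (2, some "Fsus4")
  else if b3 then (1, some "Fmaj7") else if b1 then (0, some "Dm7") else (-1, none)

def stEm (b1 b2 b4 : Bool) : Int × Option String :=
  if b4 then (2, some "Fmaj7") else if b2 then (1, some "Em7")
  else if b1 then (0, some "C/E") else (-1, none)

theorem amPrio_none (c : Char) (h2 : ¬ c = '2') (h4 : ¬ c = '4') (h5 : ¬ c = '5') :
    PySem.Dict.get? amPrio (String.ofList [c]) = none := by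
  have hmk : amPrio = PySem.Dict.mk [("2", (0, "D7sus2")), ("4", (1, "Fsus4")), ("5", (2, "Am7/F(A)"))] := by decide
  rw [hmk, PySem.Dict.get?_mk_cons,
      if_neg (by rw [show ("2":String) = String.ofList ['2'] from rfl, beq_singleton];
                 simp; exact fun h => h2 h.symm),
      PySem.Dict.get?_mk_cons,
      if_neg (by rw [show ("4":String) = String.ofList ['4'] from rfl, beq_singleton];
                 simp; exact fun h => h4 h.symm),
      PySem.Dict.get?_mk_cons,
      if_neg (by rw [show ("5":String) = String.ofList ['5'] from rfl, beq_singleton];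
                 simp; exact fun h => h5 h.symm)]
  rfl

theorem dmPrio_none (c : Char) (h1 : ¬ c = '1') (h3 : ¬ c = '3') (h5 : ¬ c = '5') (h7 : ¬ c = '7') :
    PySem.Dict.get? dmPrio (String.ofList [c]) = none := by
  have hmk : dmPrio = PySem.Dict.mk [("1", (0, "Dm7")), ("3", (1, "Fmaj7")), ("5", (2, "Fsus4")), ("7", (3, "Dm6"))] := by decide
  rw [hmk, PySem.Dict.get?_mk_cons,
      if_neg (by rw [show ("1":String) = String.ofList ['1'] from rfl, beq_singleton];
                 simp; exact fun h => h1 h.symm),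
      PySem.Dict.get?_mk_cons,
      if_neg (by rw [show ("3":String) = String.ofList ['3'] from rfl, beq_singleton];
                 simp; exact fun h => h3 h.symm),
      PySem.Dict.get?_mk_cons,
      if_neg (by rw [show ("5":String) = String.ofList ['5'] from rfl, beq_singleton];
                 simp; exact fun h => h5 h.symm),
      PySem.Dict.get?_mk_cons,
      if_neg (by rw [show ("7":String) = String.ofList ['7'] from rfl, beq_singleton];
                 simp; exact fun h => h7 h.symm)]
  rfl

theorem emPrio_none (c : Char) (h1 : ¬ c = '1') (h2 : ¬ c = '2') (h4 : ¬ c = '4') :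
    PySem.Dict.get? emPrio (String.ofList [c]) = none := by
  have hmk : emPrio = PySem.Dict.mk [("1", (0, "C/E")), ("2", (1, "Em7")), ("4", (2, "Fmaj7"))] := by decide
  rw [hmk, PySem.Dict.get?_mk_cons,
      if_neg (by rw [show ("1":String) = String.ofList ['1'] from rfl, beq_singleton];
                 simp; exact fun h => h1 h.symm),
      PySem.Dict.get?_mk_cons,
      if_neg (by rw [show ("2":String) = String.ofList ['2'] from rfl, beq_singleton];
                 simp; exact fun h => h2 h.symm),
      PySem.Dict.get?_mk_cons,
      if_neg (by rw [show ("4":String) = String.ofList ['4'] from rfl, beq_singleton];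
                 simp; exact fun h => h4 h.symm)]
  rfl

theorem amFold (cs : List Char) (b2 b4 b5 : Bool) :
    cs.foldl (stepB amPrio) (stAm b2 b4 b5)
      = stAm (b2 || cs.contains '2') (b4 || cs.contains '4') (b5 || cs.contains '5') := by
  induction cs generalizing b2 b4 b5 with
  | nil => simp
  | cons c cs ih =>
    rw [List.foldl_cons]
    by_cases h2 : c = '2'
    · subst h2
      rw [show stepB amPrio (stAm b2 b4 b5) '2' = stAm true b4 b5 by
            cases b2 <;> cases b4 <;> cases b5 <;> decide, ih]
      simp
    · by_cases h4 : c = '4'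
      · subst h4
        rw [show stepB amPrio (stAm b2 b4 b5) '4' = stAm b2 true b5 by
              cases b2 <;> cases b4 <;> cases b5 <;> decide, ih]
        simp
      · by_cases h5 : c = '5'
        · subst h5
          rw [show stepB amPrio (stAm b2 b4 b5) '5' = stAm b2 b4 true by
                cases b2 <;> cases b4 <;> cases b5 <;> decide, ih]
          simp
        · rw [show stepB amPrio (stAm b2 b4 b5) c = stAm b2 b4 b5 by
                rw [stepB, amPrio_none c h2 h4 h5], ih]
          have h2' : ¬ ('2' = c) := fun h => h2 h.symm
          have h4' : ¬ ('4' = c) := fun h => h4 h.symm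
          have h5' : ¬ ('5' = c) := fun h => h5 h.symm
          simp [h2', h4', h5']

theorem dmFold (cs : List Char) (b1 b3 b5 b7 : Bool) :
    cs.foldl (stepB dmPrio) (stDm b1 b3 b5 b7)
      = stDm (b1 || cs.contains '1') (b3 || cs.contains '3') (b5 || cs.contains '5') (b7 || cs.contains '7') := by
  induction cs generalizing b1 b3 b5 b7 with
  | nil => simp
  | cons c cs ih =>
    rw [List.foldl_cons]
    by_cases h1 : c = '1'
    · subst h1
      rw [show stepB dmPrio (stDm b1 b3 b5 b7) '1' = stDm true b3 b5 b7 by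
            cases b1 <;> cases b3 <;> cases b5 <;> cases b7 <;> decide, ih]
      simp
    · by_cases h3 : c = '3'
      · subst h3
        rw [show stepB dmPrio (stDm b1 b3 b5 b7) '3' = stDm b1 true b5 b7 by
              cases b1 <;> cases b3 <;> cases b5 <;> cases b7 <;> decide, ih]
        simp
      · by_cases h5 : c = '5'
        · subst h5
          rw [show stepB dmPrio (stDm b1 b3 b5 b7) '5' = stDm b1 b3 true b7 by
                cases b1 <;> cases b3 <;> cases b5 <;> cases b7 <;> decide, ih]
          simp
        · by_cases h7 : c = '7'
          · subst h7
            rw [show stepB dmPrio (stDm b1 b3 b5 b7) '7' = stDm b1 b3 b5 true by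
                  cases b1 <;> cases b3 <;> cases b5 <;> cases b7 <;> decide, ih]
            simp
          · rw [show stepB dmPrio (stDm b1 b3 b5 b7) c = stDm b1 b3 b5 b7 by
                  rw [stepB, dmPrio_none c h1 h3 h5 h7], ih]
            have h1' : ¬ ('1' = c) := fun h => h1 h.symm
            have h3' : ¬ ('3' = c) := fun h => h3 h.symm
            have h5' : ¬ ('5' = c) := fun h => h5 h.symm
            have h7' : ¬ ('7' = c) := fun h => h7 h.symm
            simp [h1', h3', h5', h7']

theorem emFold (cs : List Char) (b1 b2 b4 : Bool) :
    cs.foldl (stepB emPrio) (stEm b1 b2 b4)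
      = stEm (b1 || cs.contains '1') (b2 || cs.contains '2') (b4 || cs.contains '4') := by
  induction cs generalizing b1 b2 b4 with
  | nil => simp
  | cons c cs ih =>
    rw [List.foldl_cons]
    by_cases h1 : c = '1'
    · subst h1
      rw [show stepB emPrio (stEm b1 b2 b4) '1' = stEm true b2 b4 by
            cases b1 <;> cases b2 <;> cases b4 <;> decide, ih]
      simp
    · by_cases h2 : c = '2'
      · subst h2
        rw [show stepB emPrio (stEm b1 b2 b4) '2' = stEm b1 true b4 by
              cases b1 <;> cases b2 <;> cases b4 <;> decide, ih]
        simp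
      · by_cases h4 : c = '4'
        · subst h4
          rw [show stepB emPrio (stEm b1 b2 b4) '4' = stEm b1 b2 true by
                cases b1 <;> cases b2 <;> cases b4 <;> decide, ih]
          simp
        · rw [show stepB emPrio (stEm b1 b2 b4) c = stEm b1 b2 b4 by
                rw [stepB, emPrio_none c h1 h2 h4], ih]
          have h1' : ¬ ('1' = c) := fun h => h1 h.symm
          have h2' : ¬ ('2' = c) := fun h => h2 h.symm
          have h4' : ¬ ('4' = c) := fun h => h4 h.symm
          simp [h1', h2', h4']

-- B's char scan computes the same last-match value as A's dict scan, per table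
theorem amScan (notes : String) :
    (notes.toList.foldl (stepB amPrio) ((-1 : Int), (none : Option String))).2
      = ((Am_change.filter (fun p => PySem.Str.isIn p.1 notes)).map Prod.snd).getLast? := by
  rw [show ((-1 : Int), (none : Option String)) = stAm false false false from rfl, amFold]
  have e2 : PySem.Str.isIn "2" notes = notes.toList.contains '2' := isIn_singleton '2' notes
  have e4 : PySem.Str.isIn "4" notes = notes.toList.contains '4' := isIn_singleton '4' notes
  have e5 : PySem.Str.isIn "5" notes = notes.toList.contains '5' := isIn_singleton '5' notes
  simp only [Am_change, List.filter_cons, List.filter_nil, e2, e4, e5]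
  cases h2 : notes.toList.contains '2' <;> cases h4 : notes.toList.contains '4' <;>
    cases h5 : notes.toList.contains '5' <;> simp [stAm]

theorem dmScan (notes : String) :
    (notes.toList.foldl (stepB dmPrio) ((-1 : Int), (none : Option String))).2
      = ((Dm_change.filter (fun p => PySem.Str.isIn p.1 notes)).map Prod.snd).getLast? := by
  rw [show ((-1 : Int), (none : Option String)) = stDm false false false false from rfl, dmFold]
  have e1 : PySem.Str.isIn "1" notes = notes.toList.contains '1' := isIn_singleton '1' notes
  have e3 : PySem.Str.isIn "3" notes = notes.toList.contains '3' := isIn_singleton '3' notes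
  have e5 : PySem.Str.isIn "5" notes = notes.toList.contains '5' := isIn_singleton '5' notes
  have e7 : PySem.Str.isIn "7" notes = notes.toList.contains '7' := isIn_singleton '7' notes
  simp only [Dm_change, List.filter_cons, List.filter_nil, e1, e3, e5, e7]
  cases h1 : notes.toList.contains '1' <;> cases h3 : notes.toList.contains '3' <;>
    cases h5 : notes.toList.contains '5' <;> cases h7 : notes.toList.contains '7' <;> simp [stDm]

theorem emScan (notes : String) :
    (notes.toList.foldl (stepB emPrio) ((-1 : Int), (none : Option String))).2
      = ((Em_change.filter (fun p => PySem.Str.isIn p.1 notes)).map Prod.snd).getLast? := by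
  rw [show ((-1 : Int), (none : Option String)) = stEm false false false from rfl, emFold]
  have e1 : PySem.Str.isIn "1" notes = notes.toList.contains '1' := isIn_singleton '1' notes
  have e2 : PySem.Str.isIn "2" notes = notes.toList.contains '2' := isIn_singleton '2' notes
  have e4 : PySem.Str.isIn "4" notes = notes.toList.contains '4' := isIn_singleton '4' notes
  simp only [Em_change, List.filter_cons, List.filter_nil, e1, e2, e4]
  cases h1 : notes.toList.contains '1' <;> cases h2 : notes.toList.contains '2' <;>
    cases h4 : notes.toList.contains '4' <;> simp [stEm]

-- one step of B's index loop is also a set at i of the canonical per-position value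
theorem stepB_eq_set (song_note : List String) (lst : List String) (j : Nat)
    (hj : j < lst.length) (hjs : j < song_note.length) :
    FB song_note lst (j : Int)
      = lst.set j (canonSubst (song_note.getD j "") (lst.getD j "")) := by
  unfold FB
  simp only [PySem.List.pyGetD_natCast, PySem.List.pySetD_natCast]
  have hset : lst.set j (lst.getD j "") = lst := by
    rw [List.getD_eq_getElem lst "" hj]; exact List.set_getElem_self ..
  set notes := song_note.getD j "" with hn
  set chord := lst.getD j "" with hc
  have hstep : ∀ t, (fun (s : Int × Option String) ch =>
      match PySem.Dict.get? t (String.ofList [ch]) with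
      | some hit => if hit.1 > s.1 then (hit.1, some hit.2) else s
      | none => s) = stepB t := by intro t; funext s ch; rfl
  by_cases hAm : chord = "Am" ∨ chord = "Am7"
  · have hget : PySem.Dict.get? tableB chord = some amPrio := by
      rcases hAm with h | h <;> rw [h] <;> decide
    rw [hget]
    simp only [hstep, amScan notes]
    rw [canonSubst, if_pos hAm]
    cases ((Am_change.filter (fun p => PySem.Str.isIn p.1 notes)).map Prod.snd).getLast? with
    | none => exact hset.symm
    | some v => rfl
  · by_cases hDm : chord = "Dm"
    · have hget : PySem.Dict.get? tableB chord = some dmPrio := by rw [hDm]; decide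
      rw [hget]
      simp only [hstep, dmScan notes]
      rw [canonSubst, if_neg hAm, if_pos hDm]
      cases ((Dm_change.filter (fun p => PySem.Str.isIn p.1 notes)).map Prod.snd).getLast? with
      | none => exact hset.symm
      | some v => rfl
    · by_cases hEm : chord = "Em"
      · have hget : PySem.Dict.get? tableB chord = some emPrio := by rw [hEm]; decide
        rw [hget]
        simp only [hstep, emScan notes]
        rw [canonSubst, if_neg hAm, if_neg hDm, if_pos hEm]
        cases ((Em_change.filter (fun p => PySem.Str.isIn p.1 notes)).map Prod.snd).getLast? with
        | none => exact hset.symm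
        | some v => rfl
      · have hA : ¬ chord = "Am" := fun h => hAm (Or.inl h)
        have hA7 : ¬ chord = "Am7" := fun h => hAm (Or.inr h)
        have hnone : PySem.Dict.get? tableB chord = none := by
          have hmk : tableB = PySem.Dict.mk [("Am", amPrio), ("Am7", amPrio), ("Dm", dmPrio), ("Em", emPrio)] := by decide
          rw [hmk, PySem.Dict.get?_mk_cons, if_neg (by simp; exact fun h => hA h.symm),
              PySem.Dict.get?_mk_cons, if_neg (by simp; exact fun h => hA7 h.symm),
              PySem.Dict.get?_mk_cons, if_neg (by simp; exact fun h => hDm h.symm),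
              PySem.Dict.get?_mk_cons, if_neg (by simp; exact fun h => hEm h.symm)]
          rfl
        rw [hnone]
        rw [canonSubst, if_neg hAm, if_neg hDm, if_neg hEm]
        exact hset.symm

-- the first n steps of an index loop whose step is 'set i (f notes[i] lst[i])' rewrite
-- exactly the positions < n, pointwise (getD view); used for BOTH ports
theorem outer_pointwise (song_note : List String) (f : String → String → String)
    (F : List String → Int → List String)
    (hF : ∀ (lst : List String) (j : Nat), j < lst.length → j < song_note.length →
        F lst (j : Int) = lst.set j (f (song_note.getD j "") (lst.getD j "")))
    (chord : List String) (n : Nat) (hn : n ≤ song_note.length) (hlen : song_note.length ≤ chord.length) :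
    ∃ res, (PySem.List.pyRange 0 (n : Int) 1).foldl F chord = res ∧
      res.length = chord.length ∧
      ∀ j, res.getD j "" = if j < n then f (song_note.getD j "") (chord.getD j "")
                           else chord.getD j "" := by
  induction n with
  | zero =>
    refine ⟨chord, by simp, rfl, ?_⟩
    intro j; simp
  | succ n ih =>
    obtain ⟨res, hres, hlenr, hpt⟩ := ih (by omega)
    have hsplit : PySem.List.pyRange 0 ((n + 1 : Nat) : Int) 1
        = PySem.List.pyRange 0 (n : Int) 1 ++ [(n : Int)] := by
      have := PySem.List.pyRange_one_succ_right (a := 0) (b := (n : Int)) (by positivity)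
      push_cast
      push_cast at this
      exact this
    have hjn : n < res.length := by omega
    have hjs : n < song_note.length := by omega
    refine ⟨res.set n (f (song_note.getD n "") (chord.getD n "")), ?_, by simp [hlenr], ?_⟩
    · rw [hsplit, List.foldl_append, hres, List.foldl_cons, List.foldl_nil]
      rw [hF res n hjn hjs]
      congr 1
      rw [hpt n, if_neg (by omega)]
    · intro j
      by_cases hjl : j < res.length
      · rw [List.getD_eq_getElem _ "" (by simpa using hjl), List.getElem_set]
        by_cases hjeq : n = j
        · subst hjeq
          rw [if_pos rfl, if_pos (by omega)]
        · rw [if_neg hjeq, ← List.getD_eq_getElem res "" hjl, hpt j]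
          by_cases h1 : j < n
          · rw [if_pos h1, if_pos (by omega)]
          · rw [if_neg h1, if_neg (by omega)]
      · rw [List.getD_eq_default _ "" (by simpa using hjl), if_neg (by omega),
            List.getD_eq_default chord "" (by omega)]

-- ===== VERDICT (by name: the statement is the Claim_ definition above) =====
set_option maxHeartbeats 1000000 in
theorem change_min_chord_spec : Claim_equal_change_min_chord := by
  intro song_note chord _hdom hpre
  unfold Spec_change_min_chord
  unfold Pre_change_min_chord at hpre
  obtain ⟨resA, hA, hlA, hptA⟩ :=
    outer_pointwise song_note canonSubst (FA song_note)
      (fun lst j hj hjs => stepA_eq_set song_note lst j hj hjs)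
      chord song_note.length le_rfl hpre
  obtain ⟨resB, hB, hlB, hptB⟩ :=
    outer_pointwise song_note canonSubst (FB song_note)
      (fun lst j hj hjs => stepB_eq_set song_note lst j hj hjs)
      chord song_note.length le_rfl hpre
  have hA' : change_min_chord song_note chord = resA := by
    unfold change_min_chord
    rw [PySem.List.len_eq]
    exact hA
  have hB' : change_min_chord_alt song_note chord = resB := by
    unfold change_min_chord_alt
    rw [PySem.List.len_eq]
    exact hB
  rw [hA', hB']
  apply List.ext_getElem (by omega)
  intro j h1 h2
  rw [← List.getD_eq_getElem resA "" h1, ← List.getD_eq_getElem resB "" h2, hptA j, hptB j]
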